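-- pv_equiv track=rewrite | github.com/ukishohiro-glitch/smac | quote_logic.py | plan_paging
-- ===== SOURCE A (Python) =====
-- from typing import List, Dict, Any
--
-- Opening = Dict[str, Any]   # {"name": str, "items": List[Item], "teikeiku": List[str]}
--
-- ROWS_PER_PAGE  = 33   # 明細：12〜44行（11行目は触らない）
--
-- def _need_rows(op: Opening) -> int:
--     return len(op.get("items") or []) + len(op.get("teikeiku") or [])
--
-- def plan_paging(openings: List[Opening], rows_per_page: int = ROWS_PER_PAGE) -> int:
--     """概算ページ数。1間口≤33は同一ページ内完結、>33は分割可。"""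
--     if not openings: return 0
--     pages = 1
--     remain = rows_per_page
--     for op in openings:
--         need = _need_rows(op)
--         if need <= rows_per_page:
--             if need > remain:
--                 pages += 1
--                 remain = rows_per_page
--             remain -= need
--             if remain == 0:
--                 pages += 1
--                 remain = rows_per_page
--         else:
--             rest = need
--             while rest > 0:
--                 fit = min(remain, rest)
--                 rest -= fit
--                 remain -= fit
--                 if rest > 0:
--                     pages += 1
--                     remain = rows_per_page
--                 elif remain == 0:
--                     pages += 1
--                     remain = rows_per_page
--     return max(1, pages)
-- ===== SOURCE B (Python) =====
-- def plan_paging(openings, rows_per_page=33):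
--     """Same page estimate; each oversized opening is charged with one
--     divmod instead of a per-page while loop."""
--     if not openings:
--         return 0
--     pages, remain = 1, rows_per_page
--     for op in openings:
--         need = len(op.get("items") or []) + len(op.get("teikeiku") or [])
--         if need == 0:
--             continue
--         if need <= rows_per_page:
--             if need > remain:
--                 pages += 1
--                 remain = rows_per_page
--             if need == remain:
--                 pages += 1
--                 remain = rows_per_page
--             else:
--                 remain -= need
--         else:
--             q, s = divmod(need - remain, rows_per_page)
--             pages += q + 1
--             remain = rows_per_page - s
--     return pages
-- ===== Notes on version B (the rewrite author's own statement) =====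
-- stated objective: alternative
-- what changed: The inner while loop that pages an oversized opening one page at a time is replaced by a single divmod per opening, plus an explicit skip of zero-row openings.
-- outside the precondition, e.g. on plan_paging([{}], 0): A returns 2, B returns 1
import Mathlib
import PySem

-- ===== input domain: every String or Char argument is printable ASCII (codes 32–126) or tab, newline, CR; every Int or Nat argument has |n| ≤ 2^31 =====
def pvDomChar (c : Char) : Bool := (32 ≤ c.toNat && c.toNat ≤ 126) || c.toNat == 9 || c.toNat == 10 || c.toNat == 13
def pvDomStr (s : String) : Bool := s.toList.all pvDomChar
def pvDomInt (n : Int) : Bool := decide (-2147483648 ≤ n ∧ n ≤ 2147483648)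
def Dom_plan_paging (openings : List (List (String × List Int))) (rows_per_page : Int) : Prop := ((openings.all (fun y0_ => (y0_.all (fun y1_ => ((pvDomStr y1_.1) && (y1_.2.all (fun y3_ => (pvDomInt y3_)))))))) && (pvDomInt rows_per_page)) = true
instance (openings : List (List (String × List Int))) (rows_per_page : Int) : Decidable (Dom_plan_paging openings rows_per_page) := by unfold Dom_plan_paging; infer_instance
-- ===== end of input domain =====

-- B replaces A's per-page while loop over an oversized opening by one divmod per opening
-- (a different, loop-free pagination step; not measurably faster on the timed inputs).

-- _need_rows: len(op.get("items") or []) + len(op.get("teikeiku") or [])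
-- (first-match association-list lookup; a missing key and an empty list both contribute 0, so getD [] is exact)
def needRows (op : List (String × List Int)) : Int :=
  (((op.find? (fun p => p.1 == "items")).map Prod.snd).getD []).length
    + (((op.find? (fun p => p.1 == "teikeiku")).map Prod.snd).getD []).length

-- ===== PORT A =====
-- the inner 'while rest > 0' loop of A, fuelled (A diverges when rows_per_page ≤ 0 and
-- some opening needs rows; those inputs are outside Pre_, and the fuel used suffices inside it)
def whileA (rp : Int) : Nat → Int → Int → Int → Int × Int
  | 0, _, remain, pages => (pages, remain)
  | f + 1, rest, remain, pages =>
    if rest > 0 then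
      let fit := min remain rest
      let rest' := rest - fit
      let remain' := remain - fit
      if rest' > 0 then whileA rp f rest' rp (pages + 1)
      else if remain' = 0 then whileA rp f rest' rp (pages + 1)
      else whileA rp f rest' remain' pages
    else (pages, remain)

def stepA (rp : Int) (st : Int × Int) (op : List (String × List Int)) : Int × Int :=
  let need := needRows op
  if need ≤ rp then
    -- if need > remain: pages += 1; remain = rp -- then remain -= need; if remain == 0: …
    if need > st.2 then
      if rp - need = 0 then (st.1 + 1 + 1, rp) else (st.1 + 1, rp - need)
    else
      if st.2 - need = 0 then (st.1 + 1, rp) else (st.1, st.2 - need)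
  else
    whileA rp (need.toNat + 1) need st.2 st.1

def plan_paging (openings : List (List (String × List Int))) (rows_per_page : Int) : Int :=
  if openings = [] then 0
  else max 1 (openings.foldl (stepA rows_per_page) (1, rows_per_page)).1

-- ===== PORT B =====
def stepB (rp : Int) (st : Int × Int) (op : List (String × List Int)) : Int × Int :=
  let need := needRows op
  if need = 0 then st
  else if need ≤ rp then
    -- after the optional page break, need == remain means the opening exactly closes the page
    if need > st.2 then
      if need = rp then (st.1 + 1 + 1, rp) else (st.1 + 1, rp - need)
    else
      if need = st.2 then (st.1 + 1, rp) else (st.1, st.2 - need)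
  else
    -- q, s = divmod(need - remain, rows_per_page); the none branch (rp = 0) is unreachable inside Pre_
    match PySem.Int.divmod? (need - st.2) rp with
    | some (q, s) => (st.1 + q + 1, rp - s)
    | none => st

def plan_paging_alt (openings : List (List (String × List Int))) (rows_per_page : Int) : Int :=
  if openings = [] then 0
  else (openings.foldl (stepB rows_per_page) (1, rows_per_page)).1

-- ===== PRECONDITION & SPEC =====
-- Pre_ excludes the non-physical page sizes rows_per_page ≤ 0 with a non-empty openings list
-- (kept only when rows_per_page < 0 and every opening needs zero rows): there A loops forever
-- whenever some opening needs rows, and at rows_per_page = 0 the page count for zero-row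
-- openings is an unspecifiable degenerate corner (A counts one page per opening, B one page).
def Pre_plan_paging (openings : List (List (String × List Int))) (rows_per_page : Int) : Prop :=
  rows_per_page ≥ 1 ∨ openings = [] ∨ (rows_per_page < 0 ∧ ∀ op ∈ openings, needRows op = 0)
instance (openings : List (List (String × List Int))) (rows_per_page : Int) : Decidable (Pre_plan_paging openings rows_per_page) := by unfold Pre_plan_paging; infer_instance

def pvWitness_plan_paging : (List (List (String × List Int))) × Int :=
  ([[("items", [1, 2, 3]), ("teikeiku", [])], [("name", [7])]], 2)

def Spec_plan_paging (openings : List (List (String × List Int))) (rows_per_page : Int) (out : Int) : Prop := out = plan_paging_alt openings rows_per_page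
instance (openings : List (List (String × List Int))) (rows_per_page : Int) (out : Int) : Decidable (Spec_plan_paging openings rows_per_page out) := by unfold Spec_plan_paging; infer_instance

-- ===== CLAIM (what is proved, stated in full; the proofs are below) =====
def Claim_equal_plan_paging : Prop := ∀ (openings : List (List (String × List Int))) (rows_per_page : Int), Dom_plan_paging openings rows_per_page → Pre_plan_paging openings rows_per_page → Spec_plan_paging openings rows_per_page (plan_paging openings rows_per_page)

-- ===== LEMMAS AND PROOFS =====

-- closed form of A's while loop, used for the big-opening case
theorem whileA_closed (rp : Int) (hrp : 1 ≤ rp) :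
    ∀ (f : Nat) (rest remain pages : Int), 1 ≤ remain → remain ≤ rp → 1 ≤ rest →
      rest ≤ (f : Int) →
      whileA rp f rest remain pages =
        if rest < remain then (pages, remain - rest)
        else (pages + (rest - remain) / rp + 1, rp - (rest - remain) % rp) := by
  intro f
  induction f with
  | zero => intro rest remain pages _ _ h1 hf; exfalso; omega
  | succ f ih =>
    intro rest remain pages hr1 hr2 h1 hf
    simp only [whileA]
    rw [if_pos (by omega : rest > 0)]
    by_cases hlt : rest < remain
    · -- fit = rest, rest' = 0, remain' = remain - rest ≥ 1
      have hfit : min remain rest = rest := by omega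
      rw [hfit]
      rw [if_neg (by omega : ¬ rest - rest > 0), if_neg (by omega : ¬ remain - rest = 0)]
      rw [if_pos hlt]
      cases f with
      | zero => rfl
      | succ g => simp only [whileA]; rw [if_neg (by omega : ¬ rest - rest > 0)]
    · have hfit : min remain rest = remain := by omega
      rw [hfit, if_neg hlt]
      by_cases heq : rest = remain
      · -- rest' = 0, remain' = 0
        rw [if_neg (by omega : ¬ rest - remain > 0), if_pos (by omega : remain - remain = 0)]
        have hz : rest - remain = 0 := by omega
        have hdone : whileA rp f (rest - remain) rp (pages + 1) = (pages + 1, rp) := by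
          cases f with
          | zero => rfl
          | succ g => simp only [whileA]; rw [if_neg (by omega : ¬ rest - remain > 0)]
        rw [hdone, hz]
        simp
      · -- rest > remain: recurse with remain := rp
        rw [if_pos (by omega : rest - remain > 0)]
        rw [ih (rest - remain) rp (pages + 1) hrp le_rfl (by omega) (by omega)]
        by_cases hsm : rest - remain < rp
        · rw [if_pos hsm]
          have hq : (rest - remain) / rp = 0 := Int.ediv_eq_zero_of_lt (by omega) hsm
          have hm : (rest - remain) % rp = rest - remain := Int.emod_eq_of_lt (by omega) hsm
          rw [hq, hm]; ring_nf
        · rw [if_neg hsm]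
          have h1' : rest - remain - rp = rest - remain - 1 * rp := by ring
          have hq : (rest - remain - rp) / rp = (rest - remain) / rp - 1 := by
            rw [h1', Int.sub_mul_ediv_right _ _ (by omega : rp ≠ 0)]
          have hm : (rest - remain - rp) % rp = (rest - remain) % rp := by
            rw [h1', Int.sub_mul_emod_self_right]
          rw [hq, hm]; ring_nf

-- divmod? reduces to ediv/emod for a positive divisor
theorem divmod_pos (a b : Int) (hb : 1 ≤ b) :
    PySem.Int.divmod? a b = some (a / b, a % b) := by
  simp only [PySem.Int.divmod?]
  rw [if_neg (by omega : ¬ b = 0)]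
  rw [Int.fdiv_eq_ediv_of_nonneg a (by omega), Int.fmod_eq_emod_of_nonneg a (by omega)]

-- one step of A equals one step of B and preserves the invariant 1 ≤ pages, 1 ≤ remain ≤ rp
theorem step_eq (rp : Int) (hrp : 1 ≤ rp) (pages remain : Int)
    (hp : 1 ≤ pages) (hr1 : 1 ≤ remain) (hr2 : remain ≤ rp) (op : List (String × List Int)) :
    stepA rp (pages, remain) op = stepB rp (pages, remain) op ∧
    1 ≤ (stepB rp (pages, remain) op).1 ∧
    1 ≤ (stepB rp (pages, remain) op).2 ∧ (stepB rp (pages, remain) op).2 ≤ rp := by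
  have hneed : 0 ≤ needRows op := by unfold needRows; positivity
  by_cases h0 : needRows op = 0
  · have hle : needRows op ≤ rp := by omega
    have hgt : ¬ needRows op > (pages, remain).2 := by simp; omega
    have hz : ¬ (pages, remain).2 - needRows op = 0 := by simp; omega
    have hA : stepA rp (pages, remain) op = (pages, remain - needRows op) := by
      simp only [stepA]
      rw [if_pos hle, if_neg hgt, if_neg hz]
    have hB : stepB rp (pages, remain) op = (pages, remain) := by
      simp only [stepB]; rw [if_pos h0]
    rw [hA, hB, h0]
    exact ⟨by norm_num, hp, hr1, hr2⟩
  · by_cases hle : needRows op ≤ rp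
    · by_cases hgt : needRows op > (pages, remain).2
      · by_cases heq : needRows op = rp
        · have hz : rp - needRows op = 0 := by omega
          have hA : stepA rp (pages, remain) op = (pages + 1 + 1, rp) := by
            simp only [stepA]; rw [if_pos hle, if_pos hgt, if_pos hz]
          have hB : stepB rp (pages, remain) op = (pages + 1 + 1, rp) := by
            simp only [stepB]; rw [if_neg h0, if_pos hle, if_pos hgt, if_pos heq]
          rw [hA, hB]
          exact ⟨rfl, by simp; omega, by simp; omega, by simp⟩
        · have hz : ¬ rp - needRows op = 0 := by omega
          have hA : stepA rp (pages, remain) op = (pages + 1, rp - needRows op) := by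
            simp only [stepA]; rw [if_pos hle, if_pos hgt, if_neg hz]
          have hB : stepB rp (pages, remain) op = (pages + 1, rp - needRows op) := by
            simp only [stepB]; rw [if_neg h0, if_pos hle, if_pos hgt, if_neg heq]
          rw [hA, hB]
          exact ⟨rfl, by simp; omega, by simp; omega, by simp; omega⟩
      · by_cases heq : needRows op = (pages, remain).2
        · have hz : (pages, remain).2 - needRows op = 0 := by simp at heq ⊢; omega
          have hA : stepA rp (pages, remain) op = (pages + 1, rp) := by
            simp only [stepA]; rw [if_pos hle, if_neg hgt, if_pos hz]
          have hB : stepB rp (pages, remain) op = (pages + 1, rp) := by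
            simp only [stepB]; rw [if_neg h0, if_pos hle, if_neg hgt, if_pos heq]
          rw [hA, hB]
          exact ⟨rfl, by simp; omega, by simp; omega, by simp⟩
        · have hz : ¬ (pages, remain).2 - needRows op = 0 := by simp at heq ⊢; omega
          have hA : stepA rp (pages, remain) op = (pages, remain - needRows op) := by
            simp only [stepA]; rw [if_pos hle, if_neg hgt, if_neg hz]
          have hB : stepB rp (pages, remain) op = (pages, remain - needRows op) := by
            simp only [stepB]; rw [if_neg h0, if_pos hle, if_neg hgt, if_neg heq]
          rw [hA, hB]
          have hlt : needRows op < remain := by simp at hgt heq; omega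
          exact ⟨rfl, by simp; omega, by simp; omega, by simp; omega⟩
    · -- big opening: while loop vs divmod
      have hbig : rp < needRows op := by omega
      have hA : stepA rp (pages, remain) op =
          (pages + (needRows op - remain) / rp + 1, rp - (needRows op - remain) % rp) := by
        simp only [stepA]
        rw [if_neg hle]
        rw [whileA_closed rp hrp _ _ _ _ hr1 hr2 (by omega) (by omega)]
        rw [if_neg (by omega : ¬ needRows op < remain)]
      have hB : stepB rp (pages, remain) op =
          (pages + (needRows op - remain) / rp + 1, rp - (needRows op - remain) % rp) := by
        simp only [stepB]
        rw [if_neg h0, if_neg hle, divmod_pos _ _ hrp]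
      rw [hA, hB]
      have hm1 : 0 ≤ (needRows op - remain) % rp := Int.emod_nonneg _ (by omega)
      have hm2 : (needRows op - remain) % rp < rp := Int.emod_lt_of_pos _ (by omega)
      have hq : 0 ≤ (needRows op - remain) / rp := Int.ediv_nonneg (by omega) (by omega)
      exact ⟨rfl, by simp; omega, by simp; omega, by simp; omega⟩

-- the two folds agree and keep 1 ≤ pages
theorem fold_eq (rp : Int) (hrp : 1 ≤ rp) :
    ∀ (ops : List (List (String × List Int))) (pages remain : Int),
      1 ≤ pages → 1 ≤ remain → remain ≤ rp →
      ops.foldl (stepA rp) (pages, remain) = ops.foldl (stepB rp) (pages, remain) ∧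
      1 ≤ (ops.foldl (stepB rp) (pages, remain)).1 := by
  intro ops
  induction ops with
  | nil => intro pages remain hp _ _; exact ⟨rfl, hp⟩
  | cons op rest ih =>
    intro pages remain hp h1 h2
    obtain ⟨heq, hP, hR1, hR2⟩ := step_eq rp hrp pages remain hp h1 h2 op
    simp only [List.foldl_cons, heq]
    obtain ⟨e2, p2⟩ := ih (stepB rp (pages, remain) op).1 (stepB rp (pages, remain) op).2 hP hR1 hR2
    exact ⟨by rw [← e2], p2⟩

-- with all needs zero (negative rows_per_page branch of Pre_), both folds are the identity
theorem fold_zero (rp : Int) (hrp : rp < 0) :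
    ∀ (ops : List (List (String × List Int))), (∀ op ∈ ops, needRows op = 0) →
      ∀ st : Int × Int, ops.foldl (stepA rp) st = st ∧ ops.foldl (stepB rp) st = st := by
  intro ops
  induction ops with
  | nil => intro _ st; exact ⟨rfl, rfl⟩
  | cons op rest ih =>
    intro hz st
    have h0 : needRows op = 0 := hz op (List.mem_cons_self)
    have hA : stepA rp st op = st := by
      simp only [stepA]
      rw [if_neg (by omega : ¬ needRows op ≤ rp)]
      rw [h0]
      simp only [Int.toNat_zero, whileA]
      rw [if_neg (by omega : ¬ (0:Int) > 0)]
    have hB : stepB rp st op = st := by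
      simp only [stepB]; rw [if_pos h0]
    simp only [List.foldl_cons, hA, hB]
    exact ih (fun o ho => hz o (List.mem_cons_of_mem _ ho)) st

-- ===== VERDICT (by name: the statement is the Claim_ definition above) =====
theorem plan_paging_spec : Claim_equal_plan_paging := by
  intro openings rp _hdom hpre
  unfold Spec_plan_paging plan_paging plan_paging_alt
  by_cases hnil : openings = []
  · rw [if_pos hnil, if_pos hnil]
  · rw [if_neg hnil, if_neg hnil]
    rcases hpre with hrp | hnil' | ⟨hneg, hz⟩
    · obtain ⟨heq, hp⟩ := fold_eq rp hrp openings 1 rp le_rfl (by omega) le_rfl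
      rw [heq]
      omega
    · exact absurd hnil' hnil
    · obtain ⟨hA, hB⟩ := fold_zero rp hneg openings hz (1, rp)
      rw [hA, hB]
      norm_num
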